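-- pv_equiv track=rewrite | github.com/sean0x09/gp-founder-update | test/normalize_companies.py | choose_canonical_name
-- ===== SOURCE A (Python) =====
-- from collections import defaultdict
--
-- def choose_canonical_name(variants):
--     """
--     Choose the best canonical name from a list of variants.
--     Prefers:
--     1. The most common variant
--     2. If tie, the one with proper capitalization (first letter uppercase)
--     3. If tie, the shortest one
--     """
--     if not variants:
--         return None
--
--     # Count occurrences
--     variant_counts = defaultdict(int)
--     for variant in variants:
--         variant_counts[variant] += 1
--
--     # Find the most common
--     max_count = max(variant_counts.values())
--     most_common = [v for v, count in variant_counts.items() if count == max_count]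
--
--     # If multiple with same count, prefer proper capitalization
--     properly_capitalized = [v for v in most_common if v and v[0].isupper()]
--     if properly_capitalized:
--         # Among properly capitalized, prefer shortest
--         return min(properly_capitalized, key=len)
--
--     # Otherwise, prefer shortest among most common
--     return min(most_common, key=len)
-- ===== SOURCE B (Python) =====
-- def choose_canonical_name(variants):
--     """Pick the canonical variant in one keyed pass over the occurrence counts."""
--     if not variants:
--         return None
--     counts = {}
--     for v in variants:
--         counts[v] = counts.get(v, 0) + 1
--     best, _ = min(
--         counts.items(),
--         key=lambda kv: (-kv[1], 0 if (kv[0] and kv[0][0].isupper()) else 1, len(kv[0])),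
--     )
--     return best
-- ===== Notes on version B (the rewrite author's own statement) =====
-- stated objective: simpler
-- what changed: Replaces A's max-count computation plus two filter passes, a branch, and two keyed mins with a single min over the counted items using the composite key (-count, capitalization rank, length).
import Mathlib
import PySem

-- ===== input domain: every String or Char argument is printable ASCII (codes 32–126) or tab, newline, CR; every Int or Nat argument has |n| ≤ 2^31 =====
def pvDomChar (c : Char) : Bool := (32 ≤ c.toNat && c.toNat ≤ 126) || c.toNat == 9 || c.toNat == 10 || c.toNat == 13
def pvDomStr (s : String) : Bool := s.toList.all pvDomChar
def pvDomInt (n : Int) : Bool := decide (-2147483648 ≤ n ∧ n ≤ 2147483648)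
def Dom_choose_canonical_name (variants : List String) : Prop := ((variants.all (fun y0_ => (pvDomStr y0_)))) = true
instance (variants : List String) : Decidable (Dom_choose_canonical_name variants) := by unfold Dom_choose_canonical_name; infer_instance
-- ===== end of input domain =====

-- B replaces A's max-count pass plus two filters, a branch and two keyed mins by one min
-- over the counted items under the composite key (-count, capitalization rank, length): simpler, same result.

-- ===== PORT A =====
-- Python truthiness test `v and v[0].isupper()`: empty string is falsy, else test the first character
def pvIsCap (v : String) : Bool :=
  match v.toList with
  | [] => false
  | c :: _ => PySem.Chars.isupper c

def choose_canonical_name (variants : List String) : Option String :=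
  match variants with
  | [] => none
  | _ :: _ =>
    -- variant_counts = defaultdict(int); for variant in variants: variant_counts[variant] += 1
    let counts : PySem.Dict String Int :=
      variants.foldl (fun d v => d.modify v 0 (· + 1)) PySem.Dict.empty
    -- max_count = max(variant_counts.values())  (values is nonempty here; none is unreachable)
    match PySem.List.max? (PySem.Dict.values counts) (fun c => c) with
    | none => none
    | some max_count =>
      let most_common : List String :=
        ((PySem.Dict.items counts).filter (fun p => p.2 == max_count)).map (fun p => p.1)
      let properly_capitalized : List String := most_common.filter pvIsCap
      if properly_capitalized ≠ [] then
        PySem.List.min? properly_capitalized PySem.Str.len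
      else
        PySem.List.min? most_common PySem.Str.len

-- ===== PORT B =====
-- the lexicographic `<` of Python's 3-tuple keys, written out component by component
def pvKeyLt (a b : Int × Int × Int) : Bool :=
  a.1 < b.1 || (a.1 == b.1 && (a.2.1 < b.2.1 || (a.2.1 == b.2.1 && a.2.2 < b.2.2)))

-- key kv = (-count, 0 if capitalized else 1, len(name))
def pvKey (kv : String × Int) : Int × Int × Int :=
  (-kv.2, if pvIsCap kv.1 then 0 else 1, PySem.Str.len kv.1)

def choose_canonical_name_alt (variants : List String) : Option String :=
  match variants with
  | [] => none
  | _ :: _ =>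
    -- counts = {}; for v in variants: counts[v] = counts.get(v, 0) + 1
    let counts : PySem.Dict String Int :=
      variants.foldl (fun d v => d.insert v (d.getD v 0 + 1)) PySem.Dict.empty
    -- best, _ = min(counts.items(), key=...)  (running first-minimum, as Python's min)
    let best : Option (String × Int) :=
      (PySem.Dict.items counts).foldl
        (fun acc kv =>
          match acc with
          | none => some kv
          | some m => if pvKeyLt (pvKey kv) (pvKey m) then some kv else some m)
        none
    best.map (fun kv => kv.1)

-- ===== PRECONDITION & SPEC =====
def Spec_choose_canonical_name (variants : List String) (out : Option String) : Prop := out = choose_canonical_name_alt variants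
instance (variants : List String) (out : Option String) : Decidable (Spec_choose_canonical_name variants out) := by unfold Spec_choose_canonical_name; infer_instance

-- ===== CLAIM (what is proved, stated in full; the proofs are below) =====
def Claim_equal_choose_canonical_name : Prop := ∀ (variants : List String), Dom_choose_canonical_name variants → Spec_choose_canonical_name variants (choose_canonical_name variants)

-- ===== LEMMAS AND PROOFS =====

-- the shared shape of all three running-minimum folds (Python min keeps the FIRST extremal element)
def minStep (lt : (String × Int) → (String × Int) → Bool)
    (acc : Option (String × Int)) (kv : String × Int) : Option (String × Int) :=
  match acc with
  | none => some kv
  | some m => if lt kv m then some kv else some m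

def pvRank (v : String) : Int := if pvIsCap v then 0 else 1

def pvLtB (x y : String × Int) : Bool := pvKeyLt (pvKey x) (pvKey y)

def pvLt2 (x y : String × Int) : Bool :=
  pvRank x.1 < pvRank y.1 || (pvRank x.1 == pvRank y.1 && PySem.Str.len x.1 < PySem.Str.len y.1)

def pvLt3 (x y : String × Int) : Bool := PySem.Str.len x.1 < PySem.Str.len y.1

-- invariant tying the full-key running minimum to the running minimum over the stage-filtered list
def pvLink (f : String × Int → Int) (m : Int) (aL aG : Option (String × Int)) : Prop :=
  (aG = none ∧ (aL = none ∨ ∃ b, aL = some b ∧ m < f b)) ∨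
  (∃ b, aL = some b ∧ aG = some b ∧ f b = m)

lemma pvLex_fold (lt1 lt2 : (String × Int) → (String × Int) → Bool)
    (f : String × Int → Int) (m : Int)
    (hEq : ∀ z b, f z = m → f b = m → lt1 z b = lt2 z b)
    (hLt : ∀ z b, f z = m → m < f b → lt1 z b = true)
    (hGt : ∀ z b, m < f z → f b = m → lt1 z b = false) :
    ∀ (l : List (String × Int)), (∀ z ∈ l, m ≤ f z) → ∀ aL aG, pvLink f m aL aG →
      pvLink f m (l.foldl (minStep lt1) aL)
        ((l.filter (fun z => f z == m)).foldl (minStep lt2) aG) := by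
  intro l
  induction l with
  | nil => intro _ aL aG h; exact h
  | cons z t ih =>
    intro hle aL aG hlink
    have hz := hle z (by simp)
    have hle' : ∀ y ∈ t, m ≤ f y := fun y hy => hle y (by simp [hy])
    by_cases hfz : f z = m
    · -- z survives the filter
      rw [List.filter_cons_of_pos (by simp [hfz])]
      simp only [List.foldl_cons]
      apply ih hle'
      rcases hlink with ⟨hG, hL⟩ | ⟨b, hbL, hbG, hbm⟩
      · subst hG
        rcases hL with hL | ⟨b, hbL, hbgt⟩
        · subst hL
          exact Or.inr ⟨z, rfl, rfl, hfz⟩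
        · subst hbL
          simp only [minStep, hLt z b hfz hbgt, if_true]
          exact Or.inr ⟨z, rfl, rfl, hfz⟩
      · subst hbL; subst hbG
        simp only [minStep, hEq z b hfz hbm]
        by_cases hc : lt2 z b
        · simp only [hc, if_true]
          exact Or.inr ⟨z, rfl, rfl, hfz⟩
        · simp only [hc, Bool.false_eq_true, if_false]
          exact Or.inr ⟨b, rfl, rfl, hbm⟩
    · -- z is dropped by the filter
      have hzgt : m < f z := lt_of_le_of_ne hz (fun h => hfz h.symm)
      rw [List.filter_cons_of_neg (by simp [hfz])]
      simp only [List.foldl_cons]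
      apply ih hle'
      rcases hlink with ⟨hG, hL⟩ | ⟨b, hbL, hbG, hbm⟩
      · subst hG
        rcases hL with hL | ⟨b, hbL, hbgt⟩
        · subst hL
          exact Or.inl ⟨rfl, Or.inr ⟨z, rfl, hzgt⟩⟩
        · subst hbL
          simp only [minStep]
          by_cases hc : lt1 z b
          · simp only [hc, if_true]
            exact Or.inl ⟨rfl, Or.inr ⟨z, rfl, hzgt⟩⟩
          · simp only [hc, Bool.false_eq_true, if_false]
            exact Or.inl ⟨rfl, Or.inr ⟨b, rfl, hbgt⟩⟩
      · subst hbL; subst hbG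
        simp only [minStep, hGt z b hzgt hbm, Bool.false_eq_true, if_false]
        exact Or.inr ⟨b, rfl, rfl, hbm⟩

lemma pvMinStep_some (lt : (String × Int) → (String × Int) → Bool) :
    ∀ (l : List (String × Int)) (b : String × Int), ∃ c, l.foldl (minStep lt) (some b) = some c := by
  intro l
  induction l with
  | nil => exact fun b => ⟨b, rfl⟩
  | cons z t ih =>
    intro b
    simp only [List.foldl_cons, minStep]
    split <;> apply ih

lemma pvFoldl_none_eq_none (lt : (String × Int) → (String × Int) → Bool)
    (l : List (String × Int)) : l.foldl (minStep lt) none = none ↔ l = [] := by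
  cases l with
  | nil => simp
  | cons z t =>
    simp only [List.foldl_cons, minStep]
    obtain ⟨c, hc⟩ := pvMinStep_some lt t z
    simp [hc]

lemma pvMin_map_fst_aux (l : List (String × Int)) :
    ∀ (acc : Option (String × Int)),
      (l.map Prod.fst).foldl
        (fun acc x =>
          match acc with
          | none => some x
          | some m => if PySem.Str.len x < PySem.Str.len m then some x else some m)
        (acc.map Prod.fst)
      = (l.foldl (minStep pvLt3) acc).map Prod.fst := by
  induction l with
  | nil => intro acc; rfl
  | cons z t ih =>
    intro acc
    cases acc with
    | none =>
      have := ih (some z)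
      simpa [minStep] using this
    | some m =>
      simp only [List.map_cons, List.foldl_cons, minStep, pvLt3, Option.map_some]
      by_cases h : PySem.Str.len z.1 < PySem.Str.len m.1
      · simp only [h, decide_true, if_true]
        simpa only [Option.map_some] using ih (some z)
      · simp only [h, decide_false, Bool.false_eq_true, if_false]
        simpa only [Option.map_some] using ih (some m)

lemma pvMin_map_fst (l : List (String × Int)) :
    PySem.List.min? (l.map Prod.fst) PySem.Str.len = (l.foldl (minStep pvLt3) none).map Prod.fst := by
  have h := pvMin_map_fst_aux l none
  simp only [Option.map_none] at h
  rw [← h]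
  unfold PySem.List.min?
  congr 1
  funext acc x
  cases acc <;> rfl

lemma pvMain : ∀ (variants : List String),
    choose_canonical_name variants = choose_canonical_name_alt variants := by
  intro variants
  cases variants with
  | nil => rfl
  | cons v vs =>
    simp only [choose_canonical_name, choose_canonical_name_alt,
      ← PySem.Dict.counter_eq_foldl, PySem.Dict.foldl_insert_getD_add_one_eq_counter]
    set items : List (String × Int) := (PySem.Dict.counter (v :: vs)).items with hitems
    have hitems_ne : items ≠ [] := by
      rw [hitems, PySem.Dict.items_counter, PySem.Set.ofList_cons]
      simp
    have hvals : PySem.Dict.values (PySem.Dict.counter (v :: vs)) = items.map Prod.snd := rfl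
    -- bridge B's inline fold to `minStep pvLtB`
    have hBfold : ∀ (l : List (String × Int)),
        l.foldl (fun acc kv =>
          match acc with
          | none => some kv
          | some m => if pvKeyLt (pvKey kv) (pvKey m) then some kv else some m) none
        = l.foldl (minStep pvLtB) none := by
      intro l
      have hf : (fun (acc : Option (String × Int)) (kv : String × Int) =>
          match acc with
          | none => some kv
          | some m => if pvKeyLt (pvKey kv) (pvKey m) then some kv else some m)
          = minStep pvLtB := by
        funext acc x; cases acc <;> rfl
      rw [hf]
    rw [hBfold]
    split
    case _ hmax =>
      exfalso
      have h0 := (PySem.List.max?_eq_none_iff _ _).mp hmax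
      rw [hvals] at h0
      exact hitems_ne (List.map_eq_nil_iff.mp h0)
    case _ M hmax =>
    rw [hvals] at hmax
    have hleM : ∀ z ∈ items, z.2 ≤ M := by
      intro z hz
      exact PySem.List.max?_isMax hmax z.2 (List.mem_map_of_mem hz)
    have hmemM : ∃ z ∈ items, z.2 = M := by
      have := PySem.List.max?_mem hmax
      rcases List.mem_map.mp this with ⟨z, hz, hzz⟩
      exact ⟨z, hz, hzz⟩
    -- stage 1: the full-key minimum agrees with the (rank, len) minimum over the max-count rows
    set mc : List (String × Int) := items.filter (fun p => p.2 == M) with hmc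
    have hmc_ne : mc ≠ [] := by
      rcases hmemM with ⟨z, hz, hzM⟩
      intro h
      have : z ∈ mc := List.mem_filter.mpr ⟨hz, by simp [hzM]⟩
      simp [h] at this
    have h1 := pvLex_fold pvLtB pvLt2 (fun z => -z.2) (-M)
      (by
        intro z b hz hb
        replace hz : -z.2 = -M := hz
        replace hb : -b.2 = -M := hb
        have hz2 : z.2 = M := by omega
        have hb2 : b.2 = M := by omega
        simp [pvLtB, pvKeyLt, pvKey, pvLt2, pvRank, hz2, hb2]
        rfl)
      (by
        intro z b hz hb
        replace hz : -z.2 = -M := hz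
        replace hb : -M < -b.2 := hb
        have : -z.2 < -b.2 := by omega
        simp [pvLtB, pvKeyLt, pvKey, this])
      (by
        intro z b hz hb
        replace hz : -M < -z.2 := hz
        replace hb : -b.2 = -M := hb
        have h1 : ¬(-z.2 < -b.2) := by omega
        have h2 : ¬(-z.2 = -b.2) := by omega
        simp [pvLtB, pvKeyLt, pvKey, h1, h2])
      items (by intro z hz; show -M ≤ -z.2; have := hleM z hz; omega)
      none none (Or.inl ⟨rfl, Or.inl rfl⟩)
    have hfilt1 : items.filter (fun z => -z.2 == -M) = mc := by
      rw [hmc]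
      apply List.filter_congr
      intro z _
      by_cases h : z.2 = M
      · simp [h]
      · have h' : ¬(-z.2 = -M) := by omega
        simp [h, h']
    rw [hfilt1] at h1
    rcases h1 with ⟨hG, _⟩ | ⟨b, hbL, hbG, _⟩
    · exact absurd ((pvFoldl_none_eq_none pvLt2 mc).mp hG) hmc_ne
    rw [hbL]
    -- stage 2: branch on whether any max-count variant is capitalized
    by_cases hpc : mc.filter (fun z => pvIsCap z.1) = []
    · -- no capitalized candidate: all ranks are 1, A's capitalized filter is empty
      have hall : ∀ z ∈ mc, pvIsCap z.1 = false := by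
        intro z hz
        have := List.filter_eq_nil_iff.mp hpc z hz
        simpa using this
      have hrank1 : ∀ z ∈ mc, pvRank z.1 = 1 := by
        intro z hz; simp [pvRank, hall z hz]
      have hrle : ∀ z : String × Int, pvRank z.1 ≤ 1 := by
        intro z; unfold pvRank; split <;> omega
      have h2 := pvLex_fold pvLt2 pvLt3 (fun z => pvRank z.1) 1
        (by
          intro z b hz hb
          replace hz : pvRank z.1 = 1 := hz
          replace hb : pvRank b.1 = 1 := hb
          simp [pvLt2, pvLt3, hz, hb])
        (by
          intro z b hz hb
          replace hb : 1 < pvRank b.1 := hb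
          exact absurd hb (by have := hrle b; omega))
        (by
          intro z b hz hb
          replace hz : 1 < pvRank z.1 := hz
          exact absurd hz (by have := hrle z; omega))
        mc (by intro z hz; show (1:Int) ≤ pvRank z.1; rw [hrank1 z hz])
        none none (Or.inl ⟨rfl, Or.inl rfl⟩)
      have hfilt2 : mc.filter (fun z => pvRank z.1 == 1) = mc :=
        List.filter_eq_self.mpr (by intro z hz; simp [hrank1 z hz])
      rw [hfilt2, hbG] at h2
      rcases h2 with ⟨hG, _⟩ | ⟨c, hcL, hcG, _⟩
      · exact absurd ((pvFoldl_none_eq_none pvLt3 mc).mp hG) hmc_ne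
      obtain rfl := Option.some.inj hcL
      have hpcs : (mc.map (fun p => p.1)).filter pvIsCap = [] := by
        rw [show ((fun p : String × Int => p.1) = Prod.fst) from rfl, List.filter_map]
        rw [show (pvIsCap ∘ Prod.fst) = (fun z : String × Int => pvIsCap z.1) from rfl, hpc]
        rfl
      rw [if_neg (by simp [hpcs])]
      have hmf := pvMin_map_fst mc
      rw [hcG] at hmf
      simpa using hmf
    · -- some capitalized candidate: A keeps exactly the rank-0 rows
      have h2 := pvLex_fold pvLt2 pvLt3 (fun z => pvRank z.1) 0
        (by
          intro z b hz hb
          replace hz : pvRank z.1 = 0 := hz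
          replace hb : pvRank b.1 = 0 := hb
          simp [pvLt2, pvLt3, hz, hb])
        (by
          intro z b hz hb
          replace hz : pvRank z.1 = 0 := hz
          replace hb : 0 < pvRank b.1 := hb
          simp [pvLt2, hz, hb])
        (by
          intro z b hz hb
          replace hz : 0 < pvRank z.1 := hz
          replace hb : pvRank b.1 = 0 := hb
          have h1 : ¬(pvRank z.1 < pvRank b.1) := by omega
          have h2 : ¬(pvRank z.1 = pvRank b.1) := by omega
          simp [pvLt2, h1, h2])
        mc (by intro z hz; show (0:Int) ≤ pvRank z.1; unfold pvRank; split <;> omega)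
        none none (Or.inl ⟨rfl, Or.inl rfl⟩)
      have hfilt2 : mc.filter (fun z => pvRank z.1 == 0) = mc.filter (fun z => pvIsCap z.1) :=
        List.filter_congr (by
          intro z _
          cases hc : pvIsCap z.1 <;> simp [pvRank, hc])
      rw [hfilt2, hbG] at h2
      rcases h2 with ⟨hG, _⟩ | ⟨c, hcL, hcG, _⟩
      · exact absurd ((pvFoldl_none_eq_none pvLt3 _).mp hG) hpc
      obtain rfl := Option.some.inj hcL
      have hpcs : (mc.map (fun p => p.1)).filter pvIsCap
          = (mc.filter (fun z => pvIsCap z.1)).map Prod.fst := by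
        rw [show ((fun p : String × Int => p.1) = Prod.fst) from rfl, List.filter_map]
        rfl
      rw [if_pos (by rw [hpcs]; simpa using hpc)]
      rw [hpcs]
      have hmf := pvMin_map_fst (mc.filter (fun z => pvIsCap z.1))
      rw [hcG] at hmf
      simpa using hmf

-- ===== VERDICT (by name: the statement is the Claim_ definition above) =====
theorem choose_canonical_name_spec : Claim_equal_choose_canonical_name := by
  intro variants _
  exact pvMain variants
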